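-- pv_equiv track=rewrite | github.com/ciquLi/ProbInfer | regular.py | valley_free
-- ===== SOURCE A (Python) =====
-- def get_as_relationship(relationship,as1,as2):
--     #<provider-as>|<customer-as>|-1 反过来为1 peer peer 为0  ,sibling - sibling 2
--     try:
--         rel = relationship[as1][as2]
--     except:
--         try:
--             rel = -relationship[as2][as1]
--         except:
--             rel = 2
--
--     return rel
--
-- def valley_free(as_list,rel_dict):
--     res = True
--     relationship = []
--     for i in range(len(as_list)-1):
--         rel = get_as_relationship(rel_dict,as_list[i],as_list[i+1])
--         relationship.append(rel)
--     if relationship.count(0) > 1: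
--         res = False
--         return res
--     if -1 in relationship:
--         pos = relationship.index(-1)
--         if 1 in relationship[pos+1:]:
--             res = False
--             return res
--     if -1 in relationship:
--         pos = relationship.index(-1)
--         if 0 in relationship[pos+1:]:
--             res = False
--             return res
--     if 0 in relationship:
--         pos = relationship.index(0)
--         if 1 in relationship[pos+1:]:
--             res = False
--             return False
--     return res
-- ===== SOURCE B (Python) =====
-- def get_as_relationship(relationship,as1,as2):
--     #<provider-as>|<customer-as>|-1 反过来为1 peer peer 为0  ,sibling - sibling 2
--     try:
--         rel = relationship[as1][as2]
--     except:
--         try: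
--             rel = -relationship[as2][as1]
--         except:
--             rel = 2
--
--     return rel
--
-- def valley_free(as_list, rel_dict):
--     zero_count = 0
--     seen_minus1 = False
--     seen_zero = False
--     for a, b in zip(as_list, as_list[1:]):
--         rel = get_as_relationship(rel_dict, a, b)
--         if rel == 0:
--             zero_count += 1
--             if zero_count > 1 or seen_minus1:
--                 return False
--             seen_zero = True
--         elif rel == 1:
--             if seen_minus1 or seen_zero:
--                 return False
--         elif rel == -1:
--             seen_minus1 = True
--     return True
-- ===== Notes on version B (the rewrite author's own statement) =====
-- stated objective: simpler
-- what changed: Replaced A's build-a-relationship-list-then-rescan-it (count, membership tests, index and slice scans) with a single forward pass over consecutive AS pairs that updates a three-variable state machine (zero_count, seen_minus1, seen_zero) and returns False at the first violation.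
import Mathlib
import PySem

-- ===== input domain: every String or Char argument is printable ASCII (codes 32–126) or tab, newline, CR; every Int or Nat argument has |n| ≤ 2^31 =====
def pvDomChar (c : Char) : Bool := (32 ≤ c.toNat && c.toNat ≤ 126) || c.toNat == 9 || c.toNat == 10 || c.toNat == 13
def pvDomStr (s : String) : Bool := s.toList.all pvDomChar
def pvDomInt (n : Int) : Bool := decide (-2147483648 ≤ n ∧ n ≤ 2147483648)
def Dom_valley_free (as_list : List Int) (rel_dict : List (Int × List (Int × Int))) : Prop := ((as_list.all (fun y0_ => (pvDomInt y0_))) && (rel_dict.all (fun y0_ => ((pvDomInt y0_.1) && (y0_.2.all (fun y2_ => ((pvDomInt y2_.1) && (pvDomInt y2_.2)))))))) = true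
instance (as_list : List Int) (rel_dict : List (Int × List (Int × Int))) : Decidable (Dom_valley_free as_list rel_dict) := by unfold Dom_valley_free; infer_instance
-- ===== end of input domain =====

-- B replaces A's list-building plus four rescans (count / index / slice membership) by one
-- forward pass over consecutive pairs with a small state machine; objective: simpler.

-- ===== PORT A =====
-- shared helper, used verbatim by both Pythons
def get_as_relationship (relationship : List (Int × List (Int × Int))) (as1 as2 : Int) : Int :=
  match ((PySem.Dict.mk relationship).get? as1).bind (fun d => (PySem.Dict.mk d).get? as2) with
  | some rel => rel
  | none =>
    match ((PySem.Dict.mk relationship).get? as2).bind (fun d => (PySem.Dict.mk d).get? as1) with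
    | some rel => -rel
    | none => 2

def valley_free (as_list : List Int) (rel_dict : List (Int × List (Int × Int))) : Bool :=
  let relationship : List Int :=
    (PySem.List.pyRange 0 ((as_list.length : Int) - 1) 1).foldl
      (fun acc i => acc ++ [get_as_relationship rel_dict (PySem.List.pyGetD as_list i 0)
                              (PySem.List.pyGetD as_list (i + 1) 0)]) []
  if relationship.count 0 > 1 then false
  else if ((-1 : Int) ∈ relationship) ∧
       ((1 : Int) ∈ PySem.List.slice relationship
          (some ((((PySem.List.index? relationship (-1)).getD 0 : Nat) : Int) + 1)) none) then false
  else if ((-1 : Int) ∈ relationship) ∧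
       ((0 : Int) ∈ PySem.List.slice relationship
          (some ((((PySem.List.index? relationship (-1)).getD 0 : Nat) : Int) + 1)) none) then false
  else if ((0 : Int) ∈ relationship) ∧
       ((1 : Int) ∈ PySem.List.slice relationship
          (some ((((PySem.List.index? relationship 0).getD 0 : Nat) : Int) + 1)) none) then false
  else true

-- ===== PORT B =====
def vfStep (rel_dict : List (Int × List (Int × Int))) :
    List Int → Int → Bool → Bool → Bool
  | a :: b :: rest, zero_count, seen_minus1, seen_zero =>
    let rel := get_as_relationship rel_dict a b
    if rel = 0 then
      let zero_count := zero_count + 1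
      if zero_count > 1 ∨ seen_minus1 = true then false
      else vfStep rel_dict (b :: rest) zero_count seen_minus1 true
    else if rel = 1 then
      if seen_minus1 = true ∨ seen_zero = true then false
      else vfStep rel_dict (b :: rest) zero_count seen_minus1 seen_zero
    else if rel = -1 then vfStep rel_dict (b :: rest) zero_count true seen_zero
    else vfStep rel_dict (b :: rest) zero_count seen_minus1 seen_zero
  | _, _, _, _ => true

def valley_free_alt (as_list : List Int) (rel_dict : List (Int × List (Int × Int))) : Bool :=
  vfStep rel_dict as_list 0 false false

-- ===== PRECONDITION & SPEC =====
def Spec_valley_free (as_list : List Int) (rel_dict : List (Int × List (Int × Int))) (out : Bool) : Prop := out = valley_free_alt as_list rel_dict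
instance (as_list : List Int) (rel_dict : List (Int × List (Int × Int))) (out : Bool) : Decidable (Spec_valley_free as_list rel_dict out) := by unfold Spec_valley_free; infer_instance

-- ===== CLAIM (what is proved, stated in full; the proofs are below) =====
def Claim_equal_valley_free : Prop := ∀ (as_list : List Int) (rel_dict : List (Int × List (Int × Int))), Dom_valley_free as_list rel_dict → Spec_valley_free as_list rel_dict (valley_free as_list rel_dict)

-- ===== LEMMAS AND PROOFS =====

-- the list of relationships of consecutive pairs, abstract in the pair function
def adjMap (g : Int → Int → Int) : List Int → List Int
  | a :: b :: rest => g a b :: adjMap g (b :: rest)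
  | _ => []

-- "w occurs strictly after the first occurrence of v"
def after (v w : Int) : List Int → Bool
  | [] => false
  | r :: rest => if r = v then decide (w ∈ rest) else after v w rest

-- closed-form of the valley-free condition on the relationship list
def good : List Int → Bool
  | [] => true
  | r :: rest => if r = 0 ∨ r = -1 then decide ((0 : Int) ∉ rest ∧ (1 : Int) ∉ rest) else good rest

def badOf (rels : List Int) : Bool :=
  decide (rels.count 0 > 1) || after (-1) 1 rels || after (-1) 0 rels || after 0 1 rels

-- B's state machine on the relationship list
def sB : List Int → Int → Bool → Bool → Bool
  | [], _, _, _ => true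
  | r :: rest, zc, sm, sz =>
    if r = 0 then
      if zc + 1 > 1 ∨ sm = true then false
      else sB rest (zc + 1) sm true
    else if r = 1 then
      if sm = true ∨ sz = true then false
      else sB rest zc sm sz
    else if r = -1 then sB rest zc true sz
    else sB rest zc sm sz

lemma after_of_not_mem_v {v w : Int} : ∀ {rels : List Int}, v ∉ rels → after v w rels = false := by
  intro rels h
  induction rels with
  | nil => rfl
  | cons r rest ih =>
    simp only [List.mem_cons, not_or] at h
    simp [after, Ne.symm h.1, ih h.2]

lemma after_of_not_mem_w {v w : Int} : ∀ {rels : List Int}, w ∉ rels → after v w rels = false := by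
  intro rels h
  induction rels with
  | nil => rfl
  | cons r rest ih =>
    simp only [List.mem_cons, not_or] at h
    by_cases hr : r = v
    · simp [after, hr, h.2]
    · simp [after, hr, ih h.2]

lemma good_eq_not_badOf : ∀ rels : List Int, good rels = !(badOf rels) := by
  intro rels
  induction rels with
  | nil => rfl
  | cons r rest ih =>
    by_cases h0 : r = 0
    · subst h0
      by_cases hz : (0 : Int) ∈ rest
      · have : 0 < rest.count (0 : Int) := List.count_pos_iff.mpr hz
        simp [good, badOf, after, hz]
      · by_cases ho : (1 : Int) ∈ rest
        · simp [good, badOf, after, hz, ho]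
        · have hc : rest.count (0 : Int) = 0 := List.count_eq_zero.mpr hz
          simp [good, badOf, after, hz, ho, hc,
                after_of_not_mem_w (v := (-1 : Int)) ho,
                after_of_not_mem_w (v := (-1 : Int)) hz]
    · by_cases hm : r = -1
      · subst hm
        by_cases hz : (0 : Int) ∈ rest
        · have : 0 < rest.count (0 : Int) := List.count_pos_iff.mpr hz
          simp [good, badOf, after, hz]
        · by_cases ho : (1 : Int) ∈ rest
          · simp [good, badOf, after, hz, ho]
          · have hc : rest.count (0 : Int) = 0 := List.count_eq_zero.mpr hz
            simp [good, badOf, after, hz, ho, hc, after_of_not_mem_v (w := (1 : Int)) hz]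
      · have hcnt : (r :: rest).count (0 : Int) = rest.count (0 : Int) :=
          List.count_cons_of_ne h0
        simp only [good, badOf, after, if_neg h0, if_neg hm,
                   if_neg (by simp [h0, hm] : ¬(r = 0 ∨ r = -1)), hcnt] at *
        exact ih

lemma range_adjMap (g : Int → Int → Int) :
    ∀ l : List Int,
      (List.range (l.length - 1)).map (fun k => g (l.getD k 0) (l.getD (k + 1) 0)) = adjMap g l := by
  intro l
  induction l with
  | nil => rfl
  | cons a t ih =>
    cases t with
    | nil => rfl
    | cons b rest =>
      have hlen : (a :: b :: rest).length - 1 = rest.length + 1 := by simp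
      rw [hlen, List.range_succ_eq_map, List.map_cons, List.map_map]
      have htail :
          (List.range rest.length).map
              ((fun k => g ((a :: b :: rest).getD k 0) ((a :: b :: rest).getD (k + 1) 0)) ∘ Nat.succ)
            = (List.range ((b :: rest).length - 1)).map
                (fun k => g ((b :: rest).getD k 0) ((b :: rest).getD (k + 1) 0)) := by
        simp [Function.comp, List.getD_cons_succ, Nat.succ_eq_add_one]
      rw [htail, ih]
      rfl

lemma map_pyRange_adjMap (g : Int → Int → Int) (l : List Int) :
    (PySem.List.pyRange 0 ((l.length : Int) - 1) 1).map
      (fun i => g (PySem.List.pyGetD l i 0) (PySem.List.pyGetD l (i + 1) 0)) = adjMap g l := by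
  rw [PySem.List.pyRange_zero, List.map_map,
      show ((l.length : Int) - 1).toNat = l.length - 1 from by omega,
      ← range_adjMap g l]
  apply List.map_congr_left
  intro k hk
  simp only [Function.comp_apply]
  rw [show ((k : Int) + 1) = ((k + 1 : Nat) : Int) from by push_cast; ring]
  rw [PySem.List.pyGetD_natCast, PySem.List.pyGetD_natCast]

lemma drop_after (v w : Int) :
    ∀ rels : List Int, v ∈ rels →
      (w ∈ rels.drop (((PySem.List.index? rels v).getD 0) + 1) ↔ after v w rels = true) := by
  intro rels
  induction rels with
  | nil => intro h; cases h
  | cons r rest ih =>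
    intro hv
    by_cases hr : r = v
    · subst hr
      rw [PySem.List.index?_cons_self]
      simp [after]
    · have hv' : v ∈ rest := by
        rcases List.mem_cons.mp hv with h | h
        · exact absurd h.symm hr
        · exact h
      rw [PySem.List.index?_cons_of_ne rest hr]
      obtain ⟨k, hk⟩ := Option.isSome_iff_exists.mp
        ((PySem.List.index?_isSome_iff rest v).mpr hv')
      rw [hk]
      simp only [Option.map_some, Option.getD_some]
      rw [List.drop_succ_cons]
      have h2 := ih hv'
      rw [hk] at h2
      simp only [Option.getD_some] at h2
      simp [after, hr, h2]

lemma slice_to_drop (rels : List Int) (k : Nat) :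
    PySem.List.slice rels (some ((k : Int) + 1)) none = rels.drop (k + 1) := by
  have : ((k : Int) + 1) = ((k + 1 : Nat) : Int) := by push_cast; ring
  rw [this, PySem.List.slice_from_natCast]

lemma after_mem_v {v w : Int} : ∀ {rels : List Int}, after v w rels = true → v ∈ rels := by
  intro rels h
  induction rels with
  | nil => simp [after] at h
  | cons r rest ih =>
    by_cases hr : r = v
    · simp [hr]
    · simp only [after, if_neg hr] at h
      exact List.mem_cons_of_mem _ (ih h)

lemma mem_slice_iff_after (v w : Int) (rels : List Int) :
    (v ∈ rels ∧ w ∈ PySem.List.slice rels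
        (some ((((PySem.List.index? rels v).getD 0 : Nat) : Int) + 1)) none)
      ↔ after v w rels = true := by
  constructor
  · rintro ⟨hv, hs⟩
    rw [slice_to_drop] at hs
    exact (drop_after v w rels hv).mp hs
  · intro h
    have hv := after_mem_v h
    exact ⟨hv, by rw [slice_to_drop]; exact (drop_after v w rels hv).mpr h⟩

lemma valley_free_eq_good (as_list : List Int) (rel_dict : List (Int × List (Int × Int))) :
    valley_free as_list rel_dict = good (adjMap (get_as_relationship rel_dict) as_list) := by
  unfold valley_free
  rw [PySem.List.foldl_append_singleton_eq_map, List.nil_append,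
      map_pyRange_adjMap (get_as_relationship rel_dict) as_list]
  rw [good_eq_not_badOf]
  simp only [mem_slice_iff_after]
  unfold badOf
  by_cases c1 : (adjMap (get_as_relationship rel_dict) as_list).count 0 > 1
  · simp [c1]
  · cases h1 : after (-1) 1 (adjMap (get_as_relationship rel_dict) as_list) <;>
    cases h2 : after (-1) 0 (adjMap (get_as_relationship rel_dict) as_list) <;>
    cases h3 : after 0 1 (adjMap (get_as_relationship rel_dict) as_list) <;>
    simp [c1, h1, h2, h3]

lemma vfStep_eq_sB (rel_dict : List (Int × List (Int × Int))) :
    ∀ (l : List Int) (zc : Int) (sm sz : Bool),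
      vfStep rel_dict l zc sm sz = sB (adjMap (get_as_relationship rel_dict) l) zc sm sz := by
  intro l
  induction l with
  | nil => intro zc sm sz; rfl
  | cons a t ih =>
    intro zc sm sz
    cases t with
    | nil => rfl
    | cons b rest =>
      simp only [vfStep, adjMap, sB]
      split_ifs <;> first | rfl | exact ih _ _ _
       
lemma sB_sm_true : ∀ (rels : List Int) (zc : Int) (sz : Bool),
    sB rels zc true sz = decide ((0 : Int) ∉ rels ∧ (1 : Int) ∉ rels) := by
  intro rels
  induction rels with
  | nil => intro zc sz; rfl
  | cons r rest ih =>
    intro zc sz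
    by_cases h0 : r = 0
    · simp [sB, h0]
    · by_cases h1 : r = 1
      · simp [sB, h0, h1]
      · by_cases hm : r = -1
        · simp [sB, h0, h1, hm, ih]
        · simp [sB, h0, h1, hm, ih, Ne.symm h0, Ne.symm h1]

lemma sB_one_zero : ∀ rels : List Int,
    sB rels 1 false true = decide ((0 : Int) ∉ rels ∧ (1 : Int) ∉ rels) := by
  intro rels
  induction rels with
  | nil => rfl
  | cons r rest ih =>
    by_cases h0 : r = 0
    · simp [sB, h0]
    · by_cases h1 : r = 1
      · simp [sB, h0, h1]
      · by_cases hm : r = -1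
        · simp [sB, h0, h1, hm, sB_sm_true]
        · simp [sB, h0, h1, hm, ih, Ne.symm h0, Ne.symm h1]

lemma sB_eq_good : ∀ rels : List Int, sB rels 0 false false = good rels := by
  intro rels
  induction rels with
  | nil => rfl
  | cons r rest ih =>
    by_cases h0 : r = 0
    · simp [sB, good, h0, sB_one_zero]
    · by_cases h1 : r = 1
      · simp [sB, good, h0, h1, ih]
      · by_cases hm : r = -1
        · simp [sB, good, h0, h1, hm, sB_sm_true]
        · simp [sB, good, h0, h1, hm, ih]

-- ===== VERDICT (by name: the statement is the Claim_ definition above) =====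
theorem valley_free_spec : Claim_equal_valley_free := by
  intro as_list rel_dict _
  unfold Spec_valley_free valley_free_alt
  rw [valley_free_eq_good, vfStep_eq_sB, sB_eq_good]
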